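-- pv_equiv track=rewrite | github.com/ShuriLove/lab4 | full/main.py | search_best_load
-- ===== SOURCE A (Python) =====
-- ITEMS = [
--     {'name': 'Винтовка',   'code': 'r', 'size': 3, 'value': 25},
--     {'name': 'Пистолет',   'code': 'p', 'size': 2, 'value': 15},
--     {'name': 'Боекомплект','code': 'a', 'size': 2, 'value': 15},
--     {'name': 'Аптечка',    'code': 'm', 'size': 2, 'value': 20},
--     {'name': 'Ингалятор',  'code': 'i', 'size': 1, 'value': 5},
--     {'name': 'Нож',        'code': 'k', 'size': 1, 'value': 15},
--     {'name': 'Топор',      'code': 'x', 'size': 3, 'value': 20},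
--     {'name': 'Оберег',     'code': 't', 'size': 1, 'value': 25},
--     {'name': 'Фляжка',     'code': 'f', 'size': 1, 'value': 15},
--     {'name': 'Антидот',    'code': 'd', 'size': 1, 'value': 10},
--     {'name': 'Еда',        'code': 's', 'size': 2, 'value': 20},
--     {'name': 'Арбалет',    'code': 'c', 'size': 2, 'value': 20},
-- ]
--
-- INDEX_INHALER = next(i for i, it in enumerate(ITEMS) if it['code'] == 'i')
--
-- INDEX_ANTIDOTE = next(i for i, it in enumerate(ITEMS) if it['code'] == 'd')
--
-- def search_best_load(cells, disease, start_score):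
--     n = len(ITEMS)
--     best_score = None
--     best_mask = 0
--     best_size = 0
--     good_sets = []
--
--     for mask in range(1 << n):
--         total_size = 0
--         total_value = 0
--
--         for i in range(n):
--             if mask & (1 << i):
--                 total_size += ITEMS[i]['size']
--                 total_value += ITEMS[i]['value']
--
--         if total_size > cells:
--             continue
--
--         if disease == 'asthma' and not (mask & (1 << INDEX_INHALER)):
--             continue
--         if disease == 'paranoia' and not (mask & (1 << INDEX_ANTIDOTE)):
--             continue
--
--         final_score = start_score + total_value
--
--         if final_score > 0:
--             good_sets.append((final_score, mask, total_size))
--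
--         if best_score is None or final_score > best_score:
--             best_score = final_score
--             best_mask = mask
--             best_size = total_size
--
--     return best_score, best_mask, best_size, good_sets
-- ===== SOURCE B (Python) =====
-- ITEMS = [
--     {'name': 'Винтовка',   'code': 'r', 'size': 3, 'value': 25},
--     {'name': 'Пистолет',   'code': 'p', 'size': 2, 'value': 15},
--     {'name': 'Боекомплект','code': 'a', 'size': 2, 'value': 15},
--     {'name': 'Аптечка',    'code': 'm', 'size': 2, 'value': 20},
--     {'name': 'Ингалятор',  'code': 'i', 'size': 1, 'value': 5},
--     {'name': 'Нож',        'code': 'k', 'size': 1, 'value': 15},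
--     {'name': 'Топор',      'code': 'x', 'size': 3, 'value': 20},
--     {'name': 'Оберег',     'code': 't', 'size': 1, 'value': 25},
--     {'name': 'Фляжка',     'code': 'f', 'size': 1, 'value': 15},
--     {'name': 'Антидот',    'code': 'd', 'size': 1, 'value': 10},
--     {'name': 'Еда',        'code': 's', 'size': 2, 'value': 20},
--     {'name': 'Арбалет',    'code': 'c', 'size': 2, 'value': 20},
-- ]
--
-- INDEX_INHALER = next(i for i, it in enumerate(ITEMS) if it['code'] == 'i')
-- INDEX_ANTIDOTE = next(i for i, it in enumerate(ITEMS) if it['code'] == 'd')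
--
--
-- def _subsets(i):
--     # all subsets of ITEMS[0..i] as (mask, size, value), in increasing mask order
--     if i < 0:
--         return [(0, 0, 0)]
--     prev = _subsets(i - 1)
--     it = ITEMS[i]
--     return prev + [(m | (1 << i), s + it['size'], v + it['value'])
--                    for (m, s, v) in prev]
--
--
-- def search_best_load(cells, disease, start_score):
--     need = 0
--     if disease == 'asthma':
--         need = 1 << INDEX_INHALER
--     elif disease == 'paranoia':
--         need = 1 << INDEX_ANTIDOTE
--
--     feas = [t for t in _subsets(len(ITEMS) - 1)
--             if t[1] <= cells and (t[0] & need) == need]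
--     good_sets = [(start_score + v, m, s) for (m, s, v) in feas
--                  if start_score + v > 0]
--     if not feas:
--         return None, 0, 0, []
--     m, s, v = max(feas, key=lambda t: t[2])
--     return start_score + v, m, s, good_sets
-- ===== Notes on version B (the rewrite author's own statement) =====
-- stated objective: faster
-- what changed: B generates every subset's (mask,size,value) triple once by a recursive doubling of the subset list, then computes the answer in staged passes - a feasibility filter, a comprehension for good_sets, and max(key=value) for the best load - instead of A's single accumulating loop that re-sums all n bits per mask; O(2^n) total work vs O(n*2^n); intended as faster (a timing run measured B 2.4-2.9x faster at the largest size across runs).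
import Mathlib
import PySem

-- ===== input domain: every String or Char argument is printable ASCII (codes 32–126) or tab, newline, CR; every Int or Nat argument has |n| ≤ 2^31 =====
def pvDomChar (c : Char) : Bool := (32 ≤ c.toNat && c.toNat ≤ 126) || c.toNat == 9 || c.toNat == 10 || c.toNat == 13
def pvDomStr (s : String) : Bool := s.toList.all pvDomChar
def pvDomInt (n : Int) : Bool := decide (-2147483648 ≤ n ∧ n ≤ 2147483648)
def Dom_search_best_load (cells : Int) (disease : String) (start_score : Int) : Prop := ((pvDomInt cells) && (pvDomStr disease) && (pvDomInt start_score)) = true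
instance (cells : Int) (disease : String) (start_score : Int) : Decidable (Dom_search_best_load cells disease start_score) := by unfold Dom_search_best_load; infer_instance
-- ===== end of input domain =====

-- B builds every subset's (mask, size, value) triple once by recursive doubling and then answers
-- in staged passes (feasibility filter, a comprehension for good_sets, max by value for the best
-- load), instead of A's single loop re-summing all n bits per mask; intended as faster
-- (a timing run measured B 2.4-2.9x at the largest size across runs).

-- ===== PORT A =====
-- module-level ITEMS: (name, code, size, value)
def pvITEMS : List (String × String × Int × Int) :=
  [ ("Винтовка",    "r", 3, 25)
  , ("Пистолет",    "p", 2, 15)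
  , ("Боекомплект", "a", 2, 15)
  , ("Аптечка",     "m", 2, 20)
  , ("Ингалятор",   "i", 1, 5)
  , ("Нож",         "k", 1, 15)
  , ("Топор",       "x", 3, 20)
  , ("Оберег",      "t", 1, 25)
  , ("Фляжка",      "f", 1, 15)
  , ("Антидот",     "d", 1, 10)
  , ("Еда",         "s", 2, 20)
  , ("Арбалет",     "c", 2, 20) ]

-- hand port of `next(i for i, it in enumerate(ITEMS) if it['code'] == c)`: first index whose
-- code matches; exact here because a matching item exists (the .getD 0 default is never taken)
def pvFirstIndexOfCode (c : String) : Int :=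
  (((PySem.List.enumerate pvITEMS 0).find? (fun p => p.2.2.1 == c)).map (·.1)).getD 0

def pvINDEX_INHALER : Int := pvFirstIndexOfCode "i"
def pvINDEX_ANTIDOTE : Int := pvFirstIndexOfCode "d"

-- A's inner loop: for i in range(n): if mask & (1 << i): accumulate size/value
-- (i ≥ 0 throughout, so `1 << i` is `1 <<< i.toNat` exactly)
def pvInner (mask : Int) : Int × Int :=
  (PySem.List.pyRange 0 (PySem.List.len pvITEMS) 1).foldl
    (fun (p : Int × Int) i =>
      if PySem.Int.band mask ((1 : Int) <<< i.toNat) ≠ 0 then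
        let it := PySem.List.pyGetD pvITEMS i ("", "", 0, 0)  -- exact: 0 ≤ i < len(ITEMS)
        (p.1 + it.2.2.1, p.2 + it.2.2.2)
      else p)
    (0, 0)

-- the body of A's mask loop (the `continue`s become else-branches);
-- state = (best_score, best_mask, best_size, good_sets)
def pvBodyA (cells : Int) (disease : String) (start_score : Int)
    (st : Option Int × Int × Int × (List (Int × Int × Int))) (mask : Int) :
    Option Int × Int × Int × (List (Int × Int × Int)) :=
  let sv := pvInner mask
  if sv.1 > cells then st
  else if disease == "asthma" && (PySem.Int.band mask ((1 : Int) <<< pvINDEX_INHALER.toNat) == 0) then st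
  else if disease == "paranoia" && (PySem.Int.band mask ((1 : Int) <<< pvINDEX_ANTIDOTE.toNat) == 0) then st
  else
    let final_score := start_score + sv.2
    let good := if final_score > 0 then st.2.2.2 ++ [(final_score, mask, sv.1)] else st.2.2.2
    match st.1 with
    | none => (some final_score, mask, sv.1, good)
    | some b =>
      if final_score > b then (some final_score, mask, sv.1, good)
      else (st.1, st.2.1, st.2.2.1, good)

def search_best_load (cells : Int) (disease : String) (start_score : Int) :
    Option Int × Int × Int × (List (Int × Int × Int)) :=
  -- n = len(ITEMS); for mask in range(1 << n) (n ≥ 0, so `.toNat` is exact)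
  (PySem.List.pyRange 0 ((1 : Int) <<< (PySem.List.len pvITEMS).toNat) 1).foldl
    (pvBodyA cells disease start_score) (none, 0, 0, [])

-- ===== PORT B =====
-- _subsets(i): all subsets of ITEMS[0..i] as (mask, size, value) triples in increasing mask
-- order; the Python recursion on i ≥ -1 becomes structural recursion on the fuel k = i + 1
def pvSubsets : Nat → List (Int × Int × Int)
  | 0 => [(0, 0, 0)]
  | k + 1 =>
    let prev := pvSubsets k
    let it := PySem.List.pyGetD pvITEMS (k : Int) ("", "", 0, 0)  -- exact: 0 ≤ k < len(ITEMS)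
    prev ++ prev.map (fun t =>
      (PySem.Int.bor t.1 ((1 : Int) <<< k), t.2.1 + it.2.2.1, t.2.2 + it.2.2.2))

-- the required-items bitmask selected by the disease (0 when no item is required)
def pvNeed (disease : String) : Int :=
  if disease == "asthma" then (1 : Int) <<< pvINDEX_INHALER.toNat
  else if disease == "paranoia" then (1 : Int) <<< pvINDEX_ANTIDOTE.toNat
  else 0

-- the comprehension's condition: t[1] <= cells and (t[0] & need) == need
def pvFeasible (cells need : Int) (t : Int × Int × Int) : Bool :=
  t.2.1 ≤ cells && PySem.Int.band t.1 need == need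

def search_best_load_alt (cells : Int) (disease : String) (start_score : Int) :
    Option Int × Int × Int × (List (Int × Int × Int)) :=
  let need := pvNeed disease
  let feas := (pvSubsets (PySem.List.len pvITEMS).toNat).filter (pvFeasible cells need)
  let good_sets := (feas.filter (fun t => decide (start_score + t.2.2 > 0))).map
      (fun t => (start_score + t.2.2, t.1, t.2.1))
  -- `max(feas, key=lambda t: t[2])` = PySem.List.max? (first maximal element), guarded by `if not feas`
  match PySem.List.max? feas (fun t => t.2.2) with
  | none => (none, 0, 0, [])
  | some t => (some (start_score + t.2.2), t.1, t.2.1, good_sets)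

-- ===== PRECONDITION & SPEC =====
def Spec_search_best_load (cells : Int) (disease : String) (start_score : Int) (out : Option Int × Int × Int × (List (Int × Int × Int))) : Prop := out = search_best_load_alt cells disease start_score
instance (cells : Int) (disease : String) (start_score : Int) (out : Option Int × Int × Int × (List (Int × Int × Int))) : Decidable (Spec_search_best_load cells disease start_score out) := by unfold Spec_search_best_load; infer_instance

-- ===== CLAIM (what is proved, stated in full; the proofs are below) =====
def Claim_equal_search_best_load : Prop := ∀ (cells : Int) (disease : String) (start_score : Int), Dom_search_best_load cells disease start_score → Spec_search_best_load cells disease start_score (search_best_load cells disease start_score)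

-- ===== LEMMAS AND PROOFS =====

-- the items' (size, value) pairs
def pvL : List (Int × Int) := pvITEMS.map (fun it => (it.2.2.1, it.2.2.2))

-- A's inner loop rephrased structurally: accumulate over the item list, bit index = position
def pvBitsum : List (Int × Int) → Nat → Int × Int → Int → Int × Int
  | [], _, p, _ => p
  | it :: rest, k, p, m =>
    pvBitsum rest (k + 1)
      (if PySem.Int.band m ((1 : Int) <<< k) ≠ 0 then (p.1 + it.1, p.2 + it.2) else p) m

-- (1 : Int) <<< j is the natural number 2^j
theorem pvShl (j : Nat) : (1 : Int) <<< j = ((2 ^ j : Nat) : Int) := by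
  have h := Int.shiftLeft_natCast 1 j
  rw [Int.shiftLeft_natCast_right] at h
  simpa [Nat.one_shiftLeft] using h

-- bit j of a is 0 when a < 2^n ≤ 2^j
theorem pvB1 (a n j : Nat) (h : a < 2 ^ n) (hj : n ≤ j) :
    PySem.Int.band (a : Int) ((1 : Int) <<< j) = 0 := by
  have ha : a < 2 ^ j := lt_of_lt_of_le h (Nat.pow_le_pow_right (by norm_num) hj)
  rw [pvShl, PySem.Int.band_natCast]
  rw [Nat.and_two_pow, Nat.testBit_lt_two_pow ha]
  simp

-- adding 2^n does not change bits below n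
theorem pvB2 (a n j : Nat) (hj : j < n) :
    PySem.Int.band ((2 ^ n + a : Nat) : Int) ((1 : Int) <<< j) =
      PySem.Int.band (a : Int) ((1 : Int) <<< j) := by
  rw [pvShl, PySem.Int.band_natCast, PySem.Int.band_natCast]
  rw [Nat.and_two_pow, Nat.and_two_pow, Nat.testBit_two_pow_add_gt hj]

-- bit n of 2^n + a is set when a < 2^n
theorem pvB3 (a n : Nat) (h : a < 2 ^ n) :
    PySem.Int.band ((2 ^ n + a : Nat) : Int) ((1 : Int) <<< n) ≠ 0 := by
  rw [pvShl, PySem.Int.band_natCast]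
  rw [Nat.and_two_pow, Nat.testBit_two_pow_add_eq, Nat.testBit_lt_two_pow h]
  simp

-- or-ing in a bit above a is addition
theorem pvNatOr (a n : Nat) (h : a < 2 ^ n) : a ||| 2 ^ n = a + 2 ^ n := by
  apply Nat.eq_of_testBit_eq
  intro i
  rcases lt_trichotomy i n with hi | rfl | hi
  · rw [Nat.testBit_lor, Nat.add_comm, Nat.testBit_two_pow_add_gt hi,
      Nat.testBit_two_pow]
    simp [Nat.ne_of_gt hi]
  · rw [Nat.testBit_lor, Nat.add_comm, Nat.testBit_two_pow_add_eq,
      Nat.testBit_lt_two_pow h, Nat.testBit_two_pow]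
    simp
  · have h1 : (2 : Nat) ^ (n + 1) ≤ 2 ^ i := Nat.pow_le_pow_right (by norm_num) hi
    have h2 : a + 2 ^ n < 2 ^ i := by
      have : (2 : Nat) ^ (n + 1) = 2 ^ n + 2 ^ n := by rw [Nat.pow_succ]; omega
      omega
    have h3 : a < 2 ^ i := by omega
    have h4 : (2 : Nat) ^ n < 2 ^ i := by omega
    rw [Nat.testBit_lor, Nat.testBit_lt_two_pow h2, Nat.testBit_lt_two_pow h3,
      Nat.testBit_lt_two_pow h4]
    rfl

theorem pvB4 (a n : Nat) (h : a < 2 ^ n) :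
    PySem.Int.bor (a : Int) ((1 : Int) <<< n) = ((2 ^ n + a : Nat) : Int) := by
  rw [pvShl, PySem.Int.bor_natCast, pvNatOr a n h, Nat.add_comm]

-- a single-bit test: (m & 2^j) == 2^j is the negation of (m & 2^j) == 0, for m a natural mask
theorem pvBitTest (a j : Nat) :
    (PySem.Int.band (a : Int) ((1 : Int) <<< j) == (1 : Int) <<< j) =
      !(PySem.Int.band (a : Int) ((1 : Int) <<< j) == 0) := by
  rw [pvShl, PySem.Int.band_natCast, Nat.and_two_pow]
  have hp : (0 : Int) < 2 ^ j := by positivity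
  cases h : a.testBit j
  · simpa [h] using hp.ne
  · simp

-- appending one item to the item list adds one (highest) bit test at the end
theorem pvBitsum_append (L : List (Int × Int)) (it : Int × Int) :
    ∀ (k : Nat) (p : Int × Int) (m : Int),
      pvBitsum (L ++ [it]) k p m =
        (if PySem.Int.band m ((1 : Int) <<< (k + L.length)) ≠ 0
         then ((pvBitsum L k p m).1 + it.1, (pvBitsum L k p m).2 + it.2)
         else pvBitsum L k p m) := by
  induction L with
  | nil => intro k p m; simp [pvBitsum]
  | cons x xs ih =>
    intro k p m
    have hl : k + 1 + xs.length = k + (xs.length + 1) := by omega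
    simp only [List.cons_append, pvBitsum, List.length_cons, ih, hl]

-- pvBitsum only looks at bits k .. k + L.length - 1 of the mask
theorem pvBitsum_congr (L : List (Int × Int)) :
    ∀ (k : Nat) (p : Int × Int) (m1 m2 : Int),
      (∀ j, k ≤ j → j < k + L.length →
        PySem.Int.band m1 ((1 : Int) <<< j) = PySem.Int.band m2 ((1 : Int) <<< j)) →
      pvBitsum L k p m1 = pvBitsum L k p m2 := by
  induction L with
  | nil => intro k p m1 m2 _; rfl
  | cons x xs ih =>
    intro k p m1 m2 hbits
    simp only [pvBitsum]
    rw [hbits k le_rfl (by simp), ih (k + 1) _ m1 m2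
      (fun j h1 h2 => hbits j (by omega) (by simp at h2 ⊢; omega))]

theorem pvTake12 : pvL.take 12 = pvL := by decide

-- B's recursive doubling lists every mask 0 .. 2^k - 1 in increasing order,
-- paired with its pvBitsum over the first k items
theorem pvSubsets_eq (k : Nat) (hk : k ≤ pvL.length) :
    pvSubsets k = (List.range (2 ^ k)).map
      (fun (a : Nat) => ((a : Int),
        (pvBitsum (pvL.take k) 0 (0, 0) (a : Int)).1,
        (pvBitsum (pvL.take k) 0 (0, 0) (a : Int)).2)) := by
  induction k with
  | zero => simp [pvSubsets, pvBitsum]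
  | succ k ih =>
    have hkl : k < pvL.length := by omega
    have hkI : k < pvITEMS.length := by simpa [pvL] using hkl
    have htake : pvL.take (k + 1) = pvL.take k ++ [pvL[k]] := by
      rw [List.take_add_one, List.getElem?_eq_getElem hkl]; rfl
    have hit : PySem.List.pyGetD pvITEMS ((k : Nat) : Int) ("", "", 0, 0) = pvITEMS[k] := by
      rw [PySem.List.pyGetD_natCast, List.getD_eq_getElem _ _ hkI]
    have hL : pvL[k] = ((pvITEMS[k].2.2.1, pvITEMS[k].2.2.2) : Int × Int) := by
      simp [pvL]
    have hr : (2 : Nat) ^ (k + 1) = 2 ^ k + 2 ^ k := by rw [Nat.pow_succ]; omega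
    rw [pvSubsets]
    simp only [hit, ih (by omega), hr, List.range_add, List.map_append, List.map_map]
    have hlen : (pvL.take k).length = k := by rw [List.length_take]; omega
    congr 1
    · -- masks 0 .. 2^k - 1: the new (highest) bit is absent, pvBitsum unchanged
      apply List.map_congr_left
      intro a ha
      rw [List.mem_range] at ha
      rw [htake, pvBitsum_append, zero_add, hlen, pvB1 a k k ha le_rfl]
      simp
    · -- masks 2^k .. 2^(k+1) - 1: or-ing the new bit = adding 2^k; pvBitsum gains item k
      apply List.map_congr_left
      intro a ha
      rw [List.mem_range] at ha
      show (PySem.Int.bor (a : Int) ((1 : Int) <<< k),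
            (pvBitsum (pvL.take k) 0 (0, 0) (a : Int)).1 + pvITEMS[k].2.2.1,
            (pvBitsum (pvL.take k) 0 (0, 0) (a : Int)).2 + pvITEMS[k].2.2.2) =
          (((2 ^ k + a : Nat) : Int),
            (pvBitsum (pvL.take (k + 1)) 0 (0, 0) ((2 ^ k + a : Nat) : Int)).1,
            (pvBitsum (pvL.take (k + 1)) 0 (0, 0) ((2 ^ k + a : Nat) : Int)).2)
      rw [pvB4 a k ha, htake, pvBitsum_append, zero_add, hlen,
        if_pos (pvB3 a k ha),
        pvBitsum_congr (pvL.take k) 0 (0, 0) ((2 ^ k + a : Nat) : Int) (a : Int)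
          (fun j _ h2 => pvB2 a k j (by simp [hlen] at h2; omega))]
      simp [hL]

-- the strict-improvement update on the best triple alone (proof device: A's loop minus goods)
def pvBCore (start_score : Int) (b : Option Int × Int × Int) (t : Int × Int × Int) :
    Option Int × Int × Int :=
  match b.1 with
  | none => (some (start_score + t.2.2), t.1, t.2.1)
  | some bb =>
    if start_score + t.2.2 > bb then (some (start_score + t.2.2), t.1, t.2.1) else b

-- A's loop body on an already-summed triple, after the guards have passed
def pvCore (start_score : Int) (st : Option Int × Int × Int × (List (Int × Int × Int)))
    (t : Int × Int × Int) : Option Int × Int × Int × (List (Int × Int × Int)) :=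
  let fs := start_score + t.2.2
  let good := if fs > 0 then st.2.2.2 ++ [(fs, t.1, t.2.1)] else st.2.2.2
  match st.1 with
  | none => (some fs, t.1, t.2.1, good)
  | some b => if fs > b then (some fs, t.1, t.2.1, good) else (st.1, st.2.1, st.2.2.1, good)

-- pointwise: A's loop body at mask a is the feasibility-guarded pvCore on the summed triple
theorem pvStepEq (cells : Int) (disease : String) (s0 : Int) (a : Nat)
    (st : Option Int × Int × Int × (List (Int × Int × Int))) :
    pvBodyA cells disease s0 st ((a : Nat) : Int) =
      (if pvFeasible cells (pvNeed disease)
          (((a : Nat) : Int), (pvInner ((a : Nat) : Int)).1, (pvInner ((a : Nat) : Int)).2)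
       then pvCore s0 st (((a : Nat) : Int), (pvInner ((a : Nat) : Int)).1, (pvInner ((a : Nat) : Int)).2)
       else st) := by
  simp only [pvBodyA, pvFeasible, pvCore]
  by_cases hc : (pvInner ((a : Nat) : Int)).1 > cells
  · rw [if_pos hc]
    simp [not_le.mpr hc]
  · rw [if_neg hc]
    have hc' : (pvInner ((a : Nat) : Int)).1 ≤ cells := not_lt.mp hc
    by_cases ha : disease = "asthma"
    · subst ha
      rw [show pvNeed "asthma" = (1 : Int) <<< pvINDEX_INHALER.toNat from rfl,
        pvBitTest a pvINDEX_INHALER.toNat]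
      cases hb : PySem.Int.band ((a : Nat) : Int) ((1 : Int) <<< pvINDEX_INHALER.toNat) == 0 <;>
        simp [hb, hc', show (("asthma" : String) == "paranoia") = false from rfl]
    · by_cases hp : disease = "paranoia"
      · subst hp
        rw [show pvNeed "paranoia" = (1 : Int) <<< pvINDEX_ANTIDOTE.toNat from rfl,
          pvBitTest a pvINDEX_ANTIDOTE.toNat]
        cases hb : PySem.Int.band ((a : Nat) : Int) ((1 : Int) <<< pvINDEX_ANTIDOTE.toNat) == 0 <;>
          simp [hb, hc', show (("paranoia" : String) == "asthma") = false from rfl]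
      · have hn : pvNeed disease = 0 := by simp [pvNeed, ha, hp]
        simp [hn, ha, hp, hc']

-- the whole mask loop, mask by mask
theorem pvFoldA (cells : Int) (disease : String) (s0 : Int) (l : List Nat)
    (init : Option Int × Int × Int × (List (Int × Int × Int))) :
    (l.map (fun a : Nat => ((a : Nat) : Int))).foldl (pvBodyA cells disease s0) init =
      (l.map (fun a : Nat =>
          (((a : Nat) : Int), (pvInner ((a : Nat) : Int)).1, (pvInner ((a : Nat) : Int)).2))).foldl
        (fun st t => if pvFeasible cells (pvNeed disease) t then pvCore s0 st t else st) init := by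
  induction l generalizing init with
  | nil => rfl
  | cons a l ih =>
    simp only [List.map_cons, List.foldl_cons, pvStepEq]
    exact ih _

-- the max?-fold step, named
def pvMStep (acc : Option (Int × Int × Int)) (t : Int × Int × Int) : Option (Int × Int × Int) :=
  match acc with
  | none => some t
  | some m => if m.2.2 < t.2.2 then some t else some m

theorem pvMax_eq (F : List (Int × Int × Int)) :
    PySem.List.max? F (fun t => t.2.2) = F.foldl pvMStep none := by
  unfold PySem.List.max?
  congr 1
  funext acc t
  cases acc <;> rfl

-- the best triple's (score, mask, size) as carried by A's state
def pvProj (s0 : Int) : Option (Int × Int × Int) → Option Int × Int × Int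
  | none => (none, 0, 0)
  | some t => (some (s0 + t.2.2), t.1, t.2.1)

-- A's strict-improvement loop computes the first maximal element, i.e. Python's max(key=...)
theorem pvBest (s0 : Int) (F : List (Int × Int × Int)) :
    ∀ acc, F.foldl (pvBCore s0) (pvProj s0 acc) = pvProj s0 (F.foldl pvMStep acc) := by
  induction F with
  | nil => intro acc; rfl
  | cons t F ih =>
    intro acc
    have hstep : pvBCore s0 (pvProj s0 acc) t = pvProj s0 (pvMStep acc t) := by
      cases acc with
      | none => rfl
      | some m =>
        simp only [pvProj, pvBCore, pvMStep]
        by_cases h : m.2.2 < t.2.2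
        · rw [if_pos (by omega : s0 + t.2.2 > s0 + m.2.2), if_pos h]
        · rw [if_neg (by omega : ¬ s0 + t.2.2 > s0 + m.2.2), if_neg h]
    simp only [List.foldl_cons, hstep]
    exact ih _

-- the good_sets component accumulates independently of the best-so-far component
theorem pvSplit (s0 : Int) (F : List (Int × Int × Int)) :
    ∀ (b : Option Int × Int × Int) (g : List (Int × Int × Int)),
      F.foldl (pvCore s0) (b.1, b.2.1, b.2.2, g) =
        ((F.foldl (pvBCore s0) b).1, (F.foldl (pvBCore s0) b).2.1, (F.foldl (pvBCore s0) b).2.2,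
          g ++ (F.filter (fun t => decide (s0 + t.2.2 > 0))).map
            (fun t => (s0 + t.2.2, t.1, t.2.1))) := by
  induction F with
  | nil => intro b g; simp
  | cons t F ih =>
    intro b g
    simp only [List.foldl_cons, List.filter_cons]
    have hcore : pvCore s0 (b.1, b.2.1, b.2.2, g) t =
        ((pvBCore s0 b t).1, (pvBCore s0 b t).2.1, (pvBCore s0 b t).2.2,
          if s0 + t.2.2 > 0 then g ++ [(s0 + t.2.2, t.1, t.2.1)] else g) := by
      cases hb : b.1 with
      | none => simp only [pvCore, pvBCore, hb]
      | some bb =>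
        simp only [pvCore, pvBCore, hb]
        by_cases h2 : s0 + t.2.2 > bb
        · simp only [if_pos h2]
        · simp only [if_neg h2, hb]
    rw [hcore]
    by_cases h : s0 + t.2.2 > 0
    · rw [if_pos h, if_pos (by simpa using h), ih (pvBCore s0 b t) (g ++ [(s0 + t.2.2, t.1, t.2.1)])]
      simp
    · rw [if_neg h, if_neg (by simpa using h), ih (pvBCore s0 b t) g]

theorem pvMain (cells : Int) (disease : String) (s0 : Int) :
    search_best_load cells disease s0 = search_best_load_alt cells disease s0 := by
  have h12 : (PySem.List.len pvITEMS).toNat = 12 := rfl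
  have hA : PySem.List.pyRange 0 ((1 : Int) <<< (PySem.List.len pvITEMS).toNat) 1 =
      (List.range (2 ^ 12)).map (fun a : Nat => ((a : Nat) : Int)) := by
    rw [h12, pvShl, PySem.List.pyRange_one]
    simp
  have hT : (List.range (2 ^ 12)).map (fun a : Nat =>
        (((a : Nat) : Int), (pvInner ((a : Nat) : Int)).1, (pvInner ((a : Nat) : Int)).2)) =
      pvSubsets (PySem.List.len pvITEMS).toNat := by
    rw [h12, pvSubsets_eq 12 (by decide), pvTake12]
    rfl
  have hAside : search_best_load cells disease s0 =
      ((pvSubsets (PySem.List.len pvITEMS).toNat).filter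
          (pvFeasible cells (pvNeed disease))).foldl (pvCore s0) (none, 0, 0, []) := by
    unfold search_best_load
    rw [hA, pvFoldA, hT, PySem.List.foldl_if_eq_foldl_filter]
  rw [hAside]
  refine Eq.trans (pvSplit s0 _ (none, 0, 0) []) ?_
  rw [show ((pvSubsets (PySem.List.len pvITEMS).toNat).filter
        (pvFeasible cells (pvNeed disease))).foldl (pvBCore s0) (none, 0, 0) =
      pvProj s0 (((pvSubsets (PySem.List.len pvITEMS).toNat).filter
        (pvFeasible cells (pvNeed disease))).foldl pvMStep none) from pvBest s0 _ none]
  rw [← pvMax_eq, List.nil_append]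
  cases hm : PySem.List.max?
      ((pvSubsets (PySem.List.len pvITEMS).toNat).filter (pvFeasible cells (pvNeed disease)))
      (fun t => t.2.2) with
  | none =>
    have hFnil : (pvSubsets (PySem.List.len pvITEMS).toNat).filter
        (pvFeasible cells (pvNeed disease)) = [] := (PySem.List.max?_eq_none_iff _ _).mp hm
    simp only [search_best_load_alt]
    rw [hm, hFnil]
    simp [pvProj]
  | some t =>
    simp only [search_best_load_alt]
    rw [hm]
    simp [pvProj]

-- ===== VERDICT (by name: the statement is the Claim_ definition above) =====
theorem search_best_load_spec : Claim_equal_search_best_load := by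
  intro cells disease start_score _
  exact pvMain cells disease start_score
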